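-- pv_equiv track=rewrite | github.com/vroxo/challenge-3s-python | pergunta_3.py | calcular_caminho_otimo
-- ===== SOURCE A (Python) =====
-- def calcular_caminho_otimo(n_casas: int) -> int:
--     """
--     Calcula o número mínimo de turnos para chegar à última casa.
--
--     Usa programação dinâmica onde dp[i] = mínimo de turnos para chegar na casa i.
--
--     Args:
--         n_casas (int): Número de casas do tabuleiro
--
--     Returns:
--         int: Número mínimo de turnos
--     """
--     # Inicialização: começamos antes da casa 1 (posição 0)
--     # Queremos chegar exatamente na casa n_casas
--
--     # dp[i] = mínimo de turnos para chegar na casa i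
--     # Começamos na posição 0 (antes do tabuleiro)
--     dp = [float('inf')] * (n_casas + 1)
--     dp[0] = 0
--
--     for posicao in range(n_casas + 1):
--         if dp[posicao] == float('inf'):
--             continue
--
--         # Tentar andar 1, 2 ou 3 casas
--         for passo in [1, 2, 3]:
--             proxima_posicao = posicao + passo
--
--             # Se passar do final, faz looping (não queremos isso no caminho ótimo)
--             if proxima_posicao == n_casas:
--                 # Chegamos exatamente no final
--                 dp[n_casas] = min(dp[n_casas], dp[posicao] + 1)
--             elif proxima_posicao < n_casas:
--                 # Ainda estamos no tabuleiro
--                 dp[proxima_posicao] = min(dp[proxima_posicao], dp[posicao] + 1)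
--             # Se proxima_posicao > n_casas, causa looping, não consideramos no caminho ótimo
--
--     return dp[n_casas]
-- ===== SOURCE B (Python) =====
-- def calcular_caminho_otimo(n_casas: int) -> int:
--     """Closed form: with steps of one, two or three squares, the minimum
--     number of turns to reach the last square is the ceiling of n_casas/3."""
--     return -(-n_casas // 3)
-- ===== Notes on version B (the rewrite author's own statement) =====
-- stated objective: faster
-- what changed: Replaced the O(n) dynamic-programming table over all positions by the closed form ceiling division by three, which equals the DP optimum for unit/double/triple steps.
import Mathlib
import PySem

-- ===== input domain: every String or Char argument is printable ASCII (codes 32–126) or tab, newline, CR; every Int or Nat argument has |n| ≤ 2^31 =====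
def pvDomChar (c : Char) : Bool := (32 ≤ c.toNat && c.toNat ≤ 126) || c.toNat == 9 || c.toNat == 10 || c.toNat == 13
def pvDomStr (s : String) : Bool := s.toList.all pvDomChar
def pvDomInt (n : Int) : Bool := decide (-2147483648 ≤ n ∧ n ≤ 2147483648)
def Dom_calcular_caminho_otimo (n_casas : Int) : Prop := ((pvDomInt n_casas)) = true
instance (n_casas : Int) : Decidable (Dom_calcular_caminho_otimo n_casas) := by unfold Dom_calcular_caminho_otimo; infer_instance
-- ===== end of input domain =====

-- B replaces A's O(n) dynamic-programming table by the closed form ceil(n_casas/3) (objective: faster).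

-- ===== PORT A =====
-- min(dp[j], dp[posicao]+1) where dp[j] may be float('inf'): inf is modelled by `none`
def pvMinO : Option Int → Int → Option Int
  | none, x => some x
  | some a, x => some (min a x)

-- one write of the inner `for passo` body: dp[p'] = min(dp[p'], v+1), with A's
-- branch order (p' == n_casas, then p' < n_casas, else nothing)
def pvUpd (n : Int) (v : Int) (dp : List (Option Int)) (p' : Int) : List (Option Int) :=
  if p' = n then dp.set n.toNat (pvMinO (dp.getD n.toNat none) (v + 1))
  else if p' < n then dp.set p'.toNat (pvMinO (dp.getD p'.toNat none) (v + 1))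
  else dp

-- one iteration of the outer loop (the `continue` when dp[posicao] == inf, then passo in [1,2,3])
def pvStep (n : Int) (dp : List (Option Int)) (posicao : Int) : List (Option Int) :=
  if dp.getD posicao.toNat none = none then dp  -- the `continue` branch
  else
    [1, 2, 3].foldl
      (fun d passo => pvUpd n ((dp.getD posicao.toNat none).getD 0) d (posicao + passo)) dp

def calcular_caminho_otimo (n_casas : Int) : Int :=
  let dp0 := (List.replicate (n_casas + 1).toNat (none : Option Int)).set 0 (some 0)
  let dp := (PySem.List.pyRange 0 (n_casas + 1) 1).foldl (pvStep n_casas) dp0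
  (dp.getD n_casas.toNat none).getD 0

-- ===== PORT B =====
def calcular_caminho_otimo_alt (n_casas : Int) : Int :=
  -(PySem.Int.floordiv (-n_casas) 3)

-- ===== PRECONDITION & SPEC =====
-- A raises IndexError (writing the start entry of an empty dp list) for negative n_casas; Pre_ excludes exactly those inputs.
def Pre_calcular_caminho_otimo (n_casas : Int) : Prop := 0 ≤ n_casas
instance (n_casas : Int) : Decidable (Pre_calcular_caminho_otimo n_casas) := by
  unfold Pre_calcular_caminho_otimo; infer_instance
def pvWitness_calcular_caminho_otimo : Int := 7

def Spec_calcular_caminho_otimo (n_casas : Int) (out : Int) : Prop := out = calcular_caminho_otimo_alt n_casas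
instance (n_casas : Int) (out : Int) : Decidable (Spec_calcular_caminho_otimo n_casas out) := by unfold Spec_calcular_caminho_otimo; infer_instance

-- ===== CLAIM (what is proved, stated in full; the proofs are below) =====
def Claim_equal_calcular_caminho_otimo : Prop := ∀ (n_casas : Int), Dom_calcular_caminho_otimo n_casas → Pre_calcular_caminho_otimo n_casas → Spec_calcular_caminho_otimo n_casas (calcular_caminho_otimo n_casas)


-- ===== LEMMAS AND PROOFS =====

-- ceil(i/3) as a Nat computation
def pvC (i : Nat) : Int := (((i + 2) / 3 : Nat) : Int)

-- highest position already written after processing positions 0..p-1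
def pvB (n p : Nat) : Nat := if p = 0 then 0 else min (p + 2) n

-- loop invariant for A's dp table
def pvInv (n p : Nat) (dp : List (Option Int)) : Prop :=
  dp.length = n + 1 ∧
    ∀ i : Nat, i ≤ n → dp.getD i none = if i ≤ pvB n p then some (pvC i) else none

lemma pvGetD_set_self {α : Type} (l : List α) (k : Nat) (x : α) (d : α) (h : k < l.length) :
    (l.set k x).getD k d = x := by
  rw [List.getD_eq_getElem?_getD, List.getElem?_set, if_pos rfl, if_pos h, Option.getD_some]

lemma pvGetD_set_ne {α : Type} (l : List α) {k i : Nat} (x : α) (d : α) (h : i ≠ k) :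
    (l.set k x).getD i d = l.getD i d := by
  rw [List.getD_eq_getElem?_getD, List.getD_eq_getElem?_getD, List.getElem?_set,
      if_neg (Ne.symm h)]

lemma length_pvUpd (n v : Int) (dp : List (Option Int)) (j : Int) :
    (pvUpd n v dp j).length = dp.length := by
  unfold pvUpd; split_ifs <;> simp

lemma getD_pvUpd (n v : Int) (dp : List (Option Int)) (j : Int) (i : Nat)
    (hj : 0 < j) (hlen : dp.length = n.toNat + 1) :
    (pvUpd n v dp j).getD i none =
      if (i : Int) = j ∧ j ≤ n then pvMinO (dp.getD i none) (v + 1) else dp.getD i none := by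
  unfold pvUpd
  rcases lt_trichotomy j n with hlt | heq | hgt
  · rw [if_neg (by omega), if_pos hlt]
    by_cases hij : (i : Int) = j
    · have hi : i = j.toNat := by omega
      rw [if_pos ⟨hij, le_of_lt hlt⟩, hi]
      exact pvGetD_set_self _ _ _ _ (by omega)
    · rw [if_neg (by tauto)]
      exact pvGetD_set_ne _ _ _ (by omega)
  · rw [if_pos heq]
    by_cases hij : (i : Int) = j
    · have hi : i = n.toNat := by omega
      rw [if_pos ⟨hij, le_of_eq heq⟩, hi]
      exact pvGetD_set_self _ _ _ _ (by omega)
    · rw [if_neg (by tauto)]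
      exact pvGetD_set_ne _ _ _ (by omega)
  · rw [if_neg (by omega), if_neg (by omega), if_neg (by omega)]

lemma pvStep_inv {n p : Nat} {dp : List (Option Int)} (hp : p ≤ n) (h : pvInv n p dp) :
    pvInv n (p + 1) (pvStep (n : Int) dp (p : Int)) := by
  obtain ⟨hlen, hdp⟩ := h
  have hpB : p ≤ pvB n p := by unfold pvB; split_ifs <;> omega
  have hget : dp.getD ((p : Int)).toNat none = some (pvC p) := by
    rw [Int.toNat_natCast, hdp p hp, if_pos hpB]
  unfold pvStep
  rw [hget]
  rw [if_neg (by simp)]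
  simp only [Option.getD_some, List.foldl_cons, List.foldl_nil]
  have hlen' : dp.length = ((n : Int)).toNat + 1 := by rw [hlen, Int.toNat_natCast]
  set dp1 := pvUpd (n : Int) (pvC p) dp ((p : Int) + 1) with hdp1
  set dp2 := pvUpd (n : Int) (pvC p) dp1 ((p : Int) + 2) with hdp2
  have hlen1 : dp1.length = ((n : Int)).toNat + 1 := by rw [hdp1, length_pvUpd]; exact hlen'
  have hlen2 : dp2.length = ((n : Int)).toNat + 1 := by rw [hdp2, length_pvUpd]; exact hlen1
  constructor
  · rw [length_pvUpd, hlen2, Int.toNat_natCast]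
  · intro i hi
    rw [getD_pvUpd _ _ _ _ _ (by omega) hlen2,
        hdp2, getD_pvUpd _ _ _ _ _ (by omega) hlen1,
        hdp1, getD_pvUpd _ _ _ _ _ (by omega) hlen',
        hdp i hi]
    rw [show pvB n (p + 1) = min (p + 3) n by unfold pvB; simp]
    rcases Nat.eq_zero_or_pos p with hp0 | hp0
    · subst hp0
      rw [show pvB n 0 = 0 by simp [pvB]]
      split_ifs <;> (try simp only [pvMinO]) <;>
        first
        | rfl
        | (exfalso; omega)
        | (refine congrArg some ?_; unfold pvC; omega)
    · rw [show pvB n p = min (p + 2) n by unfold pvB; rw [if_neg (by omega)]]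
      split_ifs <;> (try simp only [pvMinO]) <;>
        first
        | rfl
        | (exfalso; omega)
        | (refine congrArg some ?_; unfold pvC; omega)

def pvDp0 (N : Nat) : List (Option Int) :=
  (List.replicate (N + 1) (none : Option Int)).set 0 (some 0)

lemma pvInv_zero (N : Nat) : pvInv N 0 (pvDp0 N) := by
  constructor
  · unfold pvDp0; simp
  · intro i hi
    have hB : pvB N 0 = 0 := by unfold pvB; simp
    rw [hB]
    unfold pvDp0
    by_cases h0 : i = 0
    · subst h0
      rw [pvGetD_set_self _ _ _ _ (by simp)]
      norm_num [pvC]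
    · rw [pvGetD_set_ne _ _ _ h0, if_neg (by omega),
         List.getD_eq_getElem?_getD, List.getElem?_replicate]
      split <;> rfl

lemma pvInv_fold (N : Nat) : ∀ k, k ≤ N + 1 →
    pvInv N k (((List.range k).map (Nat.cast : Nat → Int)).foldl (pvStep (N : Int)) (pvDp0 N)) := by
  intro k
  induction k with
  | zero => intro _; simpa using pvInv_zero N
  | succ k ih =>
      intro hk
      rw [List.range_succ, List.map_append, List.foldl_append]
      simp only [List.map_cons, List.map_nil, List.foldl_cons, List.foldl_nil]
      exact pvStep_inv (by omega) (ih (by omega))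

theorem calcular_caminho_otimo_spec : Claim_equal_calcular_caminho_otimo := by
  intro n _ hpre
  unfold Pre_calcular_caminho_otimo at hpre
  unfold Spec_calcular_caminho_otimo
  obtain ⟨N, hn⟩ : ∃ N : Nat, n = (N : Int) := ⟨n.toNat, by omega⟩
  subst hn
  unfold calcular_caminho_otimo calcular_caminho_otimo_alt
  rw [PySem.Int.floordiv_eq_ediv_of_pos (by norm_num)]
  rw [PySem.List.pyRange_one]
  have harg : (((N : Int) + 1) - 0).toNat = N + 1 := by omega
  rw [harg]
  simp only [zero_add]
  have hfold := pvInv_fold N (N + 1) (le_refl _)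
  obtain ⟨hlen, hdp⟩ := hfold
  have hrepl : (((N : Int) + 1)).toNat = N + 1 := by omega
  rw [hrepl]
  have := hdp N (le_refl N)
  rw [Int.toNat_natCast]
  show ((((List.range (N+1)).map (Nat.cast : Nat → Int)).foldl (pvStep (N : Int)) (pvDp0 N)).getD N none).getD 0 = _
  rw [this]
  rw [if_pos (show N ≤ pvB N (N + 1) by simp [pvB]; omega)]
  show pvC N = -(-(N : Int) / 3)
  unfold pvC
  omega
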